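-- pv_equiv track=rewrite | github.com/d8zerg/qodeloc | tests/e2e/run_e2e.py | first_relevant_rank
-- ===== SOURCE A (Python) =====
-- def first_relevant_rank(ranked: list[str], expected: list[str]) -> int | None:
--   expected_set = {item for item in expected if item}
--   if not expected_set:
--     return None
--
--   for index, name in enumerate(ranked, start=1):
--     if name in expected_set:
--       return index
--   return None
-- ===== SOURCE B (Python) =====
-- def first_relevant_rank(ranked: list[str], expected: list[str]) -> int | None:
--   index = {}
--   for i, name in enumerate(ranked, start=1):
--     if name not in index:
--       index[name] = i
--   targets = [item for item in expected if item]
--   if not targets: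
--     return None
--   ranks = [index[t] for t in targets if t in index]
--   return min(ranks) if ranks else None
-- ===== Notes on version B (the rewrite author's own statement) =====
-- stated objective: alternative
-- what changed: B builds a first-occurrence rank index over ranked once and returns the minimum of the ranks of the non-empty expected items, instead of scanning ranked with membership tests against an expected set.
import Mathlib
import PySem

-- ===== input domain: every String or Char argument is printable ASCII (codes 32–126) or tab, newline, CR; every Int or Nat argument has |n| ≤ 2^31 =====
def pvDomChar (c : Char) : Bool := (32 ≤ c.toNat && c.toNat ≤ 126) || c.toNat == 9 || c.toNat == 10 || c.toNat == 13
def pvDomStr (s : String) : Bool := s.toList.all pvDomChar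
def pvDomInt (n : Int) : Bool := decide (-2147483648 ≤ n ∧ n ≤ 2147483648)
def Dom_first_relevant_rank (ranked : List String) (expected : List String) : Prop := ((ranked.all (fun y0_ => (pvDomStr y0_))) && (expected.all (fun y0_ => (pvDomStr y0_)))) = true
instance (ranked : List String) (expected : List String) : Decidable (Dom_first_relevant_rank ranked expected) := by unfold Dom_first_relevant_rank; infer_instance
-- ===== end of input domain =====

-- B builds a first-occurrence rank index over ranked once and takes the minimum rank
-- among the non-empty expected items (objective: alternative decomposition, same cost).

-- ===== PORT A =====
-- the 'for index, name in enumerate(ranked, start=1)' loop with early return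
def frrLoopA (s : PySem.Set String) : Int → List String → Option Int
  | _, [] => none
  | i, name :: rest => if s.contains name then some i else frrLoopA s (i+1) rest

def first_relevant_rank (ranked : List String) (expected : List String) : Option Int :=
  let expectedSet : PySem.Set String := PySem.Set.ofList (expected.filter (fun it => it ≠ ""))
  if expectedSet.isEmpty then none
  else frrLoopA expectedSet 1 ranked

-- ===== PORT B =====
-- the index-building loop: first occurrence only ('if name not in index')
def frrIndexB : PySem.Dict String Int → Int → List String → PySem.Dict String Int
  | d, _, [] => d
  | d, i, name :: rest =>
      frrIndexB (if d.contains name then d else d.insert name i) (i+1) rest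

def first_relevant_rank_alt (ranked : List String) (expected : List String) : Option Int :=
  let index := frrIndexB PySem.Dict.empty 1 ranked
  let targets := expected.filter (fun it => it ≠ "")
  if targets.isEmpty then none
  else
    let ranks := targets.filterMap (fun t => index.get? t)
    if ranks.isEmpty then none else PySem.List.min? ranks (fun x => x)

-- ===== PRECONDITION & SPEC =====
def Spec_first_relevant_rank (ranked : List String) (expected : List String) (out : Option Int) : Prop := out = first_relevant_rank_alt ranked expected
instance (ranked : List String) (expected : List String) (out : Option Int) : Decidable (Spec_first_relevant_rank ranked expected out) := by unfold Spec_first_relevant_rank; infer_instance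

-- ===== CLAIM (what is proved, stated in full; the proofs are below) =====
def Claim_equal_first_relevant_rank : Prop := ∀ (ranked : List String) (expected : List String), Dom_first_relevant_rank ranked expected → Spec_first_relevant_rank ranked expected (first_relevant_rank ranked expected)

-- ===== LEMMAS AND PROOFS =====

-- first index (offset i) of t in a list
def fidx (t : String) : Int → List String → Option Int
  | _, [] => none
  | i, x :: rest => if x = t then some i else fidx t (i+1) rest

theorem fidx_ge (t : String) : ∀ (rs : List String) (i v : Int), fidx t i rs = some v → i ≤ v := by
  intro rs
  induction rs with
  | nil => intro i v h; simp [fidx] at h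
  | cons x rest ih =>
    intro i v h
    simp only [fidx] at h
    split at h
    · injection h with hh; omega
    · have := ih (i+1) v h; omega

theorem frrIndexB_get? (t : String) : ∀ (rs : List String) (d : PySem.Dict String Int) (i : Int),
    (frrIndexB d i rs).get? t = (d.get? t).or (fidx t i rs) := by
  intro rs
  induction rs with
  | nil => intro d i; simp [frrIndexB, fidx]
  | cons x rest ih =>
    intro d i
    simp only [frrIndexB, fidx]
    rw [ih]
    by_cases hxt : x = t
    · subst hxt
      by_cases hc : d.contains x = true
      · have : (d.get? x).isSome := by rw [← PySem.Dict.contains_eq_isSome_get?]; exact hc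
        obtain ⟨v, hv⟩ := Option.isSome_iff_exists.mp this
        simp [hc, hv]
      · have hn : d.get? x = none := by
          rcases h : d.get? x with _ | v
          · rfl
          · exact absurd (by rw [PySem.Dict.contains_eq_isSome_get?, h]; rfl) hc
        simp [hc, hn, PySem.Dict.get?_insert_self]
    · have hget : (if d.contains x = true then d else d.insert x i).get? t = d.get? t := by
        split
        · rfl
        · exact PySem.Dict.get?_insert_of_ne _ _ (fun h => hxt h.symm)
      rw [hget]
      simp [hxt]

theorem frrLoopA_eq_min (T : List String) (S : PySem.Set String)
    (hS : ∀ x, S.contains x = true ↔ x ∈ T) :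
    ∀ (rs : List String) (i : Int),
      frrLoopA S i rs = PySem.List.min? (T.filterMap (fun t => fidx t i rs)) (fun x => x) := by
  intro rs
  induction rs with
  | nil =>
    intro i
    simp [frrLoopA, fidx, List.filterMap_none, PySem.List.min?]
  | cons x rest ih =>
    intro i
    simp only [frrLoopA, fidx]
    by_cases hx : x ∈ T
    · rw [if_pos ((hS x).mpr hx)]
      -- the list contains i, and every element is ≥ i ⇒ min is i
      set L := T.filterMap (fun t => if x = t then some i else fidx t (i+1) rest) with hL
      have hiL : i ∈ L := by
        rw [hL, List.mem_filterMap]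
        exact ⟨x, hx, by simp⟩
      have hge : ∀ v ∈ L, i ≤ v := by
        intro v hv
        rw [hL, List.mem_filterMap] at hv
        obtain ⟨t, _, hft⟩ := hv
        split at hft
        · injection hft with hh; omega
        · have := fidx_ge t rest (i+1) v hft; omega
      have hne : L ≠ [] := by intro h; rw [h] at hiL; simp at hiL
      rcases hm : PySem.List.min? L (fun x => x) with _ | m
      · exact absurd ((PySem.List.min?_eq_none_iff L (fun x => x)).mp hm) hne
      · have hmem := PySem.List.min?_mem hm
        have hmin := PySem.List.min?_isMin hm i hiL
        have := hge m hmem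
        have hmi : m = i := le_antisymm hmin this
        rw [hmi]
    · rw [if_neg (by rw [hS x]; exact hx)]
      rw [ih (i+1)]
      congr 1
      apply List.filterMap_congr
      intro t ht
      have : x ≠ t := fun h => hx (h ▸ ht)
      simp [this]

theorem set_ofList_eq_nil_iff (T : List String) : PySem.Set.ofList T = [] ↔ T = [] := by
  constructor
  · intro h
    cases T with
    | nil => rfl
    | cons t rest =>
      have : t ∈ PySem.Set.ofList (t :: rest) := (PySem.Set.mem_ofList _ _).mpr (List.mem_cons_self)
      rw [h] at this
      simp at this
  · intro h; subst h; rfl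

-- ===== VERDICT (by name: the statement is the Claim_ definition above) =====
theorem first_relevant_rank_spec : Claim_equal_first_relevant_rank := by
  intro ranked expected _
  unfold Spec_first_relevant_rank first_relevant_rank first_relevant_rank_alt
  set T := expected.filter (fun it => it ≠ "") with hT
  set S : PySem.Set String := PySem.Set.ofList T with hSdef
  by_cases hTnil : T = []
  · have hSnil : S = [] := by rw [hSdef, hTnil]; rfl
    simp [hTnil, hSnil]
  · have hSne : ¬ S.isEmpty := by
      rw [List.isEmpty_iff, hSdef, set_ofList_eq_nil_iff]; exact hTnil
    rw [if_neg hSne, if_neg (by rw [List.isEmpty_iff]; exact hTnil)]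
    have hS : ∀ x, S.contains x = true ↔ x ∈ T := by
      intro x
      rw [hSdef]
      constructor
      · intro h; exact (PySem.Set.mem_ofList _ _).mp (by simpa using h)
      · intro h; simpa using (PySem.Set.mem_ofList _ _).mpr h
    have hget : ∀ t, (frrIndexB PySem.Dict.empty 1 ranked).get? t = fidx t 1 ranked := by
      intro t
      rw [frrIndexB_get? t ranked PySem.Dict.empty 1, PySem.Dict.get?_empty]
      rfl
    have hranks : T.filterMap (fun t => (frrIndexB PySem.Dict.empty 1 ranked).get? t)
        = T.filterMap (fun t => fidx t 1 ranked) := by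
      apply List.filterMap_congr; intro t _; exact hget t
    rw [hranks]
    rw [frrLoopA_eq_min T S hS ranked 1]
    rcases h : T.filterMap (fun t => fidx t 1 ranked) with _ | ⟨r, rest⟩
    · simp [PySem.List.min?]
    · simp
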